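-- pv_equiv track=rewrite | github.com/rantsandruse/pytorch_lstm_04imdb | preprocess.py | seqs_to_dictionary_v4
-- ===== SOURCE A (Python) =====
-- def seqs_to_dictionary_v4(reviews):
--     corpus_vocab = {'<PAD>':0}
--     count = 1
--     for review in reviews:
--         for word in review:
--             if word not in corpus_vocab:
--                 corpus_vocab[word] = count
--                 count += 1
--
--     return corpus_vocab
-- ===== SOURCE B (Python) =====
-- def seqs_to_dictionary_v4(reviews):
--     flat = [w for review in reviews for w in review]
--     first = {w: i for i, w in reversed(list(enumerate(flat))) if w != '<PAD>'}
--     words = sorted(first, key=first.get)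
--     vocab = {'<PAD>': 0}
--     vocab.update((w, i) for i, w in enumerate(words, 1))
--     return vocab
-- ===== Notes on version B (the rewrite author's own statement) =====
-- stated objective: alternative
-- what changed: Replaces A's single incremental build (membership test + running counter) by a sort-based ranking: first-occurrence positions are computed with one overwrite-only dict comprehension over reversed(enumerate(flat)) that skips '<PAD>', then the words are sorted by that position and enumerated from 1.
import Mathlib
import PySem

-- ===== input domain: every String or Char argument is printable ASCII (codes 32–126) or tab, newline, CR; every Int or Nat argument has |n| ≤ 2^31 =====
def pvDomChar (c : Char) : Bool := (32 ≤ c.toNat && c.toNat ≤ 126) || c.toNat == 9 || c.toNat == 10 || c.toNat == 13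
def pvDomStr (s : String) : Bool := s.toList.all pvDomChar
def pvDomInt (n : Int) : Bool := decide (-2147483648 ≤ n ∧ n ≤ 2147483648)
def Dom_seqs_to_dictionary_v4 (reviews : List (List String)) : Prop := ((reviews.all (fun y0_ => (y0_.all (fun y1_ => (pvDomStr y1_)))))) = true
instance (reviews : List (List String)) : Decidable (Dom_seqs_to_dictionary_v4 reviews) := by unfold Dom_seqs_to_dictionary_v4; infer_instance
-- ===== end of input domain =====

-- B replaces A's incremental numbering (membership test + running counter) by a sort-based
-- ranking: first-occurrence positions via one reverse-overwrite dict comprehension, then a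
-- sort by position and an enumeration; same result, not claimed faster.

-- ===== PORT A =====
-- one step of A's inner loop: skip known words, else assign the next index
def pvStepA (st : PySem.Dict String Int × Int) (word : String) : PySem.Dict String Int × Int :=
  if st.1.contains word = false then (st.1.insert word st.2, st.2 + 1) else st

def seqs_to_dictionary_v4 (reviews : List (List String)) : List (String × Int) :=
  (reviews.foldl (fun st review => review.foldl pvStepA st)
    (PySem.Dict.ofList [("<PAD>", (0 : Int))], (1 : Int))).1.items

-- ===== PORT B =====
-- the 'vocab.update((w, i) for i, w in enumerate(words, 1))' loop: every w is fresh and ≠ '<PAD>',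
-- so each update appends; ported as consing '<PAD>' onto the enumeration
def pvEnumFrom (i : Int) : List String → List (String × Int)
  | [] => []
  | w :: ws => (w, i) :: pvEnumFrom (i + 1) ws

-- first = {w: i for i, w in reversed(list(enumerate(flat))) if w != '<PAD>'} ;
-- words = sorted(first, key=first.get): sorted(first) iterates the keys in insertion order, and
-- first.get w never yields None on them (every key is in first), so 'first.getD w 0' is exact here
def seqs_to_dictionary_v4_alt (reviews : List (List String)) : List (String × Int) :=
  let flat := reviews.flatMap (fun review => review)
  let first := ((PySem.List.enumerate flat 0).reverse.filter (fun p => p.2 ≠ "<PAD>")).foldl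
      (fun d p => d.insert p.2 p.1) PySem.Dict.empty
  let words := PySem.List.sorted first.keys (fun w => first.getD w 0) false
  ("<PAD>", 0) :: pvEnumFrom 1 words

-- ===== PRECONDITION & SPEC =====
def Spec_seqs_to_dictionary_v4 (reviews : List (List String)) (out : List (String × Int)) : Prop := out = seqs_to_dictionary_v4_alt reviews
instance (reviews : List (List String)) (out : List (String × Int)) : Decidable (Spec_seqs_to_dictionary_v4 reviews out) := by unfold Spec_seqs_to_dictionary_v4; infer_instance

-- ===== CLAIM (what is proved, stated in full; the proofs are below) =====
def Claim_equal_seqs_to_dictionary_v4 : Prop := ∀ (reviews : List (List String)), Dom_seqs_to_dictionary_v4 reviews → Spec_seqs_to_dictionary_v4 reviews (seqs_to_dictionary_v4 reviews)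

-- ===== LEMMAS AND PROOFS =====

-- the unique non-'<PAD>' words of ws, in first-occurrence order, appended to us
def pvCollect (us : List String) : List String → List String
  | [] => us
  | w :: ws => if w = "<PAD>" ∨ w ∈ us then pvCollect us ws else pvCollect (us ++ [w]) ws

-- B's first-occurrence dict (proof name for the dict the port builds inline)
def pvBuild (l : List String) (s : Int) : PySem.Dict String Int :=
  ((PySem.List.enumerate l s).reverse.filter (fun p => p.2 ≠ "<PAD>")).foldl
    (fun d p => d.insert p.2 p.1) PySem.Dict.empty

theorem pvEnumFrom_append (i : Int) (us : List String) (w : String) :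
    pvEnumFrom i (us ++ [w]) = pvEnumFrom i us ++ [(w, i + us.length)] := by
  induction us generalizing i with
  | nil => simp [pvEnumFrom]
  | cons u us ih =>
    simp only [List.cons_append, pvEnumFrom, ih, List.length_cons]
    have : i + 1 + (us.length : Int) = i + ((us.length + 1 : Nat) : Int) := by push_cast; ring
    rw [this]

theorem pvKeys_enumFrom (i : Int) (us : List String) :
    (pvEnumFrom i us).map Prod.fst = us := by
  induction us generalizing i with
  | nil => rfl
  | cons u us ih => simp [pvEnumFrom, ih]

-- A's nested loop, tracked against the first-occurrence list pvCollect
theorem pvInner (ws us : List String) :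
    ws.foldl pvStepA
      (PySem.Dict.mk (("<PAD>", 0) :: pvEnumFrom 1 us), 1 + (us.length : Int))
    = (PySem.Dict.mk (("<PAD>", 0) :: pvEnumFrom 1 (pvCollect us ws)),
       1 + ((pvCollect us ws).length : Int)) := by
  induction ws generalizing us with
  | nil => rfl
  | cons w ws ih =>
    have hkeys : (PySem.Dict.mk (("<PAD>", 0) :: pvEnumFrom 1 us)).keys
        = "<PAD>" :: us := by
      simp [PySem.Dict.keys, pvKeys_enumFrom]
    by_cases h : w = "<PAD>" ∨ w ∈ us
    · have hc : (PySem.Dict.mk (("<PAD>", 0) :: pvEnumFrom 1 us)).contains w = true := by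
        rw [PySem.Dict.contains_eq_decide_mem_keys, hkeys]
        simp only [List.mem_cons, decide_eq_true_eq]
        rcases h with h | h
        · exact Or.inl h
        · exact Or.inr h
      simp only [List.foldl_cons, pvStepA, hc, Bool.true_eq_false, reduceIte]
      rw [ih us]
      simp [pvCollect, h]
    · have hc : (PySem.Dict.mk (("<PAD>", 0) :: pvEnumFrom 1 us)).contains w = false := by
        rw [PySem.Dict.contains_eq_decide_mem_keys, hkeys]
        simp only [List.mem_cons, decide_eq_false_iff_not]
        intro hc
        rcases hc with hc | hc
        · exact h (Or.inl hc)
        · exact h (Or.inr hc)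
      have hins : (PySem.Dict.mk (("<PAD>", 0) :: pvEnumFrom 1 us)).insert w (1 + (us.length : Int))
          = PySem.Dict.mk (("<PAD>", 0) :: pvEnumFrom 1 (us ++ [w])) := by
        apply PySem.Dict.ext
        rw [PySem.Dict.items_insert_of_not_contains (h := hc)]
        simp [pvEnumFrom_append]
      simp only [List.foldl_cons, pvStepA, hc, reduceIte]
      rw [hins]
      have harith : 1 + (us.length : Int) + 1 = 1 + (((us ++ [w]).length : Nat) : Int) := by
        simp; ring
      rw [harith, ih (us ++ [w])]
      simp [pvCollect, h]

theorem pvNested_eq_flat (reviews : List (List String))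
    (st : PySem.Dict String Int × Int) :
    reviews.foldl (fun st review => review.foldl pvStepA st) st
    = (reviews.flatMap (fun review => review)).foldl pvStepA st := by
  induction reviews generalizing st with
  | nil => rfl
  | cons r rs ih => simp [List.flatMap_cons, List.foldl_append, ih]

-- lookups in B's dict: the first-occurrence index (None exactly at '<PAD>' and absent words)
theorem pvBuild_get? (l : List String) (s : Int) (w : String) :
    (pvBuild l s).get? w
      = if w = "<PAD>" then none
        else (PySem.List.index? l w).map (fun k => s + (k : Int)) := by
  induction l generalizing s with
  | nil =>
    simp [pvBuild, PySem.List.enumerate_nil, PySem.Dict.get?_empty, PySem.List.index?]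
  | cons x rest ih =>
    have hstep : pvBuild (x :: rest) s
        = if x = "<PAD>" then pvBuild rest (s + 1)
          else (pvBuild rest (s + 1)).insert x s := by
      unfold pvBuild
      rw [PySem.List.enumerate_cons, List.reverse_cons, List.filter_append, List.foldl_append]
      by_cases hx : x = "<PAD>"
      · simp [hx]
      · simp [hx]
    by_cases hx : x = "<PAD>"
    · rw [hstep, if_pos hx, ih]
      by_cases hw : w = "<PAD>"
      · simp [hw]
      · have hxw : x ≠ w := by rw [hx]; exact fun h => hw h.symm
        rw [if_neg hw, if_neg hw, PySem.List.index?_cons_of_ne rest hxw]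
        cases PySem.List.index? rest w with
        | none => rfl
        | some k => simp; ring
    · rw [hstep, if_neg hx, PySem.Dict.get?_insert]
      by_cases hwx : w = x
      · subst hwx
        rw [if_pos rfl, if_neg hx, PySem.List.index?_cons_self]
        simp
      · rw [if_neg hwx, ih]
        by_cases hw : w = "<PAD>"
        · simp [hw]
        · have hxw : x ≠ w := fun h => hwx h.symm
          rw [if_neg hw, if_neg hw, PySem.List.index?_cons_of_ne rest hxw]
          cases PySem.List.index? rest w with
          | none => rfl
          | some k => simp; ring

-- B's dict keys: the distinct non-'<PAD>' words (as the set of last occurrences)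
theorem pvBuild_keys (l : List String) (s : Int) :
    (pvBuild l s).keys
      = PySem.Set.ofList (l.reverse.filter (fun w => w ≠ "<PAD>")) := by
  have hrev : ((PySem.List.enumerate l s).reverse.map fun p => p.2) = l.reverse := by
    rw [List.map_reverse, PySem.List.map_snd_enumerate]
  have hmap : ((PySem.List.enumerate l s).reverse.filter (fun p => decide (p.2 ≠ "<PAD>"))).map (fun p => p.2)
      = l.reverse.filter (fun w => decide (w ≠ "<PAD>")) := by
    rw [← hrev, List.filter_map]
    rfl
  have hk := PySem.Dict.keys_foldl_insert_key
      ((PySem.List.enumerate l s).reverse.filter (fun p => decide (p.2 ≠ "<PAD>")))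
      (fun p : Int × String => p.2) (fun _ p => p.1) (PySem.Dict.empty : PySem.Dict String Int)
  unfold pvBuild
  refine hk.trans ?_
  show PySem.Set.ofList _ = _
  exact congrArg PySem.Set.ofList hmap

theorem pvBuild_mem_keys (l : List String) (s : Int) (w : String) :
    w ∈ (pvBuild l s).keys ↔ w ∈ l ∧ w ≠ "<PAD>" := by
  rw [pvBuild_keys, PySem.Set.mem_ofList, List.mem_filter, List.mem_reverse]
  simp

-- membership in the first-occurrence list
theorem pvCollect_mem (ws : List String) :
    ∀ us, "<PAD>" ∉ us →
    ∀ w, (w ∈ pvCollect us ws ↔ w ∈ us ∨ (w ∈ ws ∧ w ≠ "<PAD>")) := by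
  induction ws with
  | nil => intro us _ w; simp [pvCollect]
  | cons w' ws ih =>
    intro us hpad w
    by_cases h : w' = "<PAD>" ∨ w' ∈ us
    · rw [show pvCollect us (w' :: ws) = pvCollect us ws from by simp [pvCollect, h], ih us hpad w]
      constructor
      · rintro (hw | ⟨h1, h2⟩)
        · exact Or.inl hw
        · exact Or.inr ⟨List.mem_cons_of_mem _ h1, h2⟩
      · rintro (hw | ⟨h1, h2⟩)
        · exact Or.inl hw
        · rcases List.mem_cons.mp h1 with rfl | h1
          · rcases h with h | h
            · exact absurd h h2
            · exact Or.inl h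
          · exact Or.inr ⟨h1, h2⟩
    · rw [not_or] at h
      obtain ⟨h1, h2⟩ := h
      have hpad' : "<PAD>" ∉ us ++ [w'] := by
        simp only [List.mem_append, List.mem_cons, List.not_mem_nil, or_false]
        rintro (hh | hh)
        · exact hpad hh
        · exact h1 hh.symm
      rw [show pvCollect us (w' :: ws) = pvCollect (us ++ [w']) ws from by
            simp [pvCollect, h1, h2], ih (us ++ [w']) hpad' w]
      simp only [List.mem_append, List.mem_cons, List.not_mem_nil, or_false]
      constructor
      · rintro ((hw | rfl) | ⟨hh1, hh2⟩)
        · exact Or.inl hw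
        · exact Or.inr ⟨Or.inl rfl, h1⟩
        · exact Or.inr ⟨Or.inr hh1, hh2⟩
      · rintro (hw | ⟨(rfl | hh1), hh2⟩)
        · exact Or.inl (Or.inl hw)
        · exact Or.inl (Or.inr rfl)
        · exact Or.inr ⟨hh1, hh2⟩

theorem pvCollect_nodup (ws : List String) :
    ∀ us, us.Nodup → (pvCollect us ws).Nodup := by
  induction ws with
  | nil => intro us h; exact h
  | cons w' ws ih =>
    intro us h
    by_cases hc : w' = "<PAD>" ∨ w' ∈ us
    · rw [show pvCollect us (w' :: ws) = pvCollect us ws from by simp [pvCollect, hc]]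
      exact ih us h
    · rw [not_or] at hc
      rw [show pvCollect us (w' :: ws) = pvCollect (us ++ [w']) ws from by
            simp [pvCollect, hc.1, hc.2]]
      refine ih (us ++ [w']) ?_
      rw [List.nodup_append]
      refine ⟨h, List.nodup_singleton _, ?_⟩
      intro a ha b hb
      rw [List.mem_singleton] at hb
      subst hb
      exact fun he => hc.2 (he ▸ ha)

-- first-occurrence order is strictly increasing under the first-index key
theorem pvCollect_pairwise (flat : List String) :
    ∀ (ws us pre : List String), flat = pre ++ ws →
    (∀ u ∈ us, u ∈ pre) →
    (∀ x ∈ pre, x ≠ "<PAD>" → x ∈ us) →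
    us.Pairwise (fun a b => (PySem.List.index? flat a).getD 0 < (PySem.List.index? flat b).getD 0) →
    (pvCollect us ws).Pairwise
      (fun a b => (PySem.List.index? flat a).getD 0 < (PySem.List.index? flat b).getD 0) := by
  intro ws
  induction ws with
  | nil => intro us pre _ _ _ h; exact h
  | cons w ws ih =>
    intro us pre hflat hup hpu hpw
    by_cases h : w = "<PAD>" ∨ w ∈ us
    · simp only [pvCollect, h, if_true]
      refine ih us (pre ++ [w]) (by simp [hflat]) (fun u hu => by simp [hup u hu]) ?_ hpw
      intro x hx hxp
      rcases List.mem_append.mp hx with hx | hx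
      · exact hpu x hx hxp
      · rcases List.mem_singleton.mp hx with rfl
        rcases h with h | h
        · exact absurd h hxp
        · exact h
    · rw [not_or] at h
      obtain ⟨hwp, hwu⟩ := h
      have hwpre : w ∉ pre := fun hc => hwu (hpu w hc hwp)
      have hkw : PySem.List.index? flat w = some pre.length :=
        (PySem.List.index?_eq_some_iff flat w pre.length).mpr ⟨pre, ws, hflat, rfl, hwpre⟩
      have hlt : ∀ u ∈ us, (PySem.List.index? flat u).getD 0 < (PySem.List.index? flat w).getD 0 := by
        intro u hu
        have humem := hup u hu
        have hidx : PySem.List.index? flat u = PySem.List.index? pre u := by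
          rw [hflat]; exact PySem.List.index?_append_of_mem _ humem
        have hsome : (PySem.List.index? pre u).isSome := by
          rw [PySem.List.index?_isSome_iff]; exact humem
        obtain ⟨k, hk⟩ := Option.isSome_iff_exists.mp hsome
        obtain ⟨hklt, _, _⟩ := PySem.List.getElem_of_index?_eq_some hk
        rw [hidx, hk, hkw]
        simpa using hklt
      simp only [pvCollect, hwp, hwu, or_self, if_false]
      refine ih (us ++ [w]) (pre ++ [w]) (by simp [hflat]) ?_ ?_ ?_
      · intro u hu
        rcases List.mem_append.mp hu with hu | hu
        · simp [hup u hu]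
        · simp [hu]
      · intro x hx hxne
        rcases List.mem_append.mp hx with hx | hx
        · exact List.mem_append.mpr (Or.inl (hpu x hx hxne))
        · simp [hx]
      · rw [List.pairwise_append]
        exact ⟨hpw, List.pairwise_singleton _ _, fun a ha b hb => by
          rcases List.mem_singleton.mp hb with rfl; exact hlt a ha⟩

-- ===== VERDICT (by name: the statement is the Claim_ definition above) =====
theorem seqs_to_dictionary_v4_spec : Claim_equal_seqs_to_dictionary_v4 := by
  intro reviews _
  unfold Spec_seqs_to_dictionary_v4 seqs_to_dictionary_v4 seqs_to_dictionary_v4_alt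
  rw [pvNested_eq_flat]
  have hinit : (PySem.Dict.ofList [("<PAD>", (0 : Int))], (1 : Int))
      = (PySem.Dict.mk (("<PAD>", 0) :: pvEnumFrom 1 []), 1 + (([] : List String).length : Int)) := by
    decide
  rw [hinit, pvInner]
  set flat := reviews.flatMap (fun review => review) with hflatdef
  -- the words of B's dict are exactly the words of pvCollect [] flat
  have hmemC := pvCollect_mem flat [] (by simp)
  have hperm : (pvCollect [] flat).Perm ((pvBuild flat 0).keys) := by
    rw [List.perm_ext_iff_of_nodup (pvCollect_nodup flat [] List.nodup_nil)
      (by rw [pvBuild_keys]; exact PySem.Set.nodup_ofList _)]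
    intro a
    rw [hmemC a, pvBuild_mem_keys]
    simp
  -- B's sort key is the first-occurrence index on every collected word
  have hkeyval : ∀ w ∈ pvCollect [] flat,
      (pvBuild flat 0).getD w 0 = (((PySem.List.index? flat w).getD 0 : Nat) : Int) := by
    intro w hw
    rw [hmemC w] at hw
    rcases hw with hw | ⟨hw1, hw2⟩
    · simp at hw
    · have hsome : (PySem.List.index? flat w).isSome := by
        rw [PySem.List.index?_isSome_iff]; exact hw1
      obtain ⟨k, hk⟩ := Option.isSome_iff_exists.mp hsome
      rw [PySem.Dict.getD_eq_get?_getD, pvBuild_get?, if_neg hw2, hk]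
      simp
  have hpairInt : (pvCollect [] flat).Pairwise
      (fun a b => (pvBuild flat 0).getD a 0 < (pvBuild flat 0).getD b 0) := by
    refine (pvCollect_pairwise flat flat [] [] rfl (by simp) (by simp)
      List.Pairwise.nil).imp_of_mem ?_
    intro a b ha hb hlt
    rw [hkeyval a ha, hkeyval b hb]
    exact_mod_cast hlt
  have hsorted : PySem.List.sorted (pvBuild flat 0).keys
      (fun w => (pvBuild flat 0).getD w 0) false = pvCollect [] flat :=
    PySem.List.sorted_eq_of_perm_of_pairwise_lt _ _ _ hperm hpairInt
  show _ = ("<PAD>", (0 : Int)) :: pvEnumFrom 1 (PySem.List.sorted (pvBuild flat 0).keys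
      (fun w => (pvBuild flat 0).getD w 0) false)
  rw [hsorted]
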